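-- pv_equiv track=rewrite | github.com/ottosterner1/cfwebapp | app/services/survey_service.py | _get_nps_distribution
-- ===== SOURCE A (Python) =====
-- from typing import Dict, List, Any, Tuple
--
-- def _get_nps_distribution(scores: List[int]) -> Dict[str, int]:
--     """Get NPS score distribution"""
--     promoters = len([s for s in scores if s >= 9])
--     passives = len([s for s in scores if 7 <= s <= 8])
--     detractors = len([s for s in scores if s <= 6])
--
--     return {
--         'promoters': promoters,
--         'passives': passives,
--         'detractors': detractors
--     }
-- ===== SOURCE B (Python) =====
-- def _get_nps_distribution(scores):
--     """Get NPS score distribution (sort, then locate the two bucket boundaries)"""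
--     ss = sorted(scores)
--     n = len(ss)
--     d = 0
--     while d < n and ss[d] <= 6:
--         d += 1
--     t = d
--     while t < n and ss[t] <= 8:
--         t += 1
--     return {
--         'promoters': n - t,
--         'passives': t - d,
--         'detractors': d
--     }
-- ===== Notes on version B (the rewrite author's own statement) =====
-- stated objective: alternative
-- what changed: Instead of three filtering passes, B sorts the scores so the three NPS buckets become contiguous segments, finds the two boundary indices by scanning the sorted list, and derives all three counts from those indices by subtraction (the condition s>=9 never appears).
import Mathlib
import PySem

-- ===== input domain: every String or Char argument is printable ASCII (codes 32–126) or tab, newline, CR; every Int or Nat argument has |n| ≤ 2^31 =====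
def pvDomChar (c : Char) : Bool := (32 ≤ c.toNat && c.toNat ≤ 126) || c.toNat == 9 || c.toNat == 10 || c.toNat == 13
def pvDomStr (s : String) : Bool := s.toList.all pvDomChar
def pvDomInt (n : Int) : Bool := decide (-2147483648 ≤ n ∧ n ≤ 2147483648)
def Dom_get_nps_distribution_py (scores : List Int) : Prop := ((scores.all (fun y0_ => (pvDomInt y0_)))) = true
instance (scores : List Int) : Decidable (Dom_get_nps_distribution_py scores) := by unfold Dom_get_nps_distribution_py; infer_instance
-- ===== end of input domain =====

-- B sorts the scores and reads all three counts off the two bucket-boundary indices (objective: alternative algorithm).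

-- ===== PORT A =====
def get_nps_distribution_py (scores : List Int) : List (String × Int) :=
  let promoters : Int := ((scores.filter (fun s => decide (s ≥ 9))).length : Int)
  let passives : Int := ((scores.filter (fun s => decide (7 ≤ s ∧ s ≤ 8))).length : Int)
  let detractors : Int := ((scores.filter (fun s => decide (s ≤ 6))).length : Int)
  [("promoters", promoters), ("passives", passives), ("detractors", detractors)]

-- ===== PORT B =====
-- the 'while i < n and ss[i] <= x: i += 1' loop of Source B
def npsScan (ss : List Int) (x : Int) (i : Nat) : Nat :=
  if h : i < ss.length then
    if ss[i] ≤ x then npsScan ss x (i + 1) else i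
  else i
termination_by ss.length - i

def get_nps_distribution_py_alt (scores : List Int) : List (String × Int) :=
  let ss := PySem.List.sorted scores (fun s => s) false
  let n := ss.length
  let d := npsScan ss 6 0
  let t := npsScan ss 8 d
  [("promoters", (n : Int) - (t : Int)), ("passives", (t : Int) - (d : Int)), ("detractors", (d : Int))]

-- ===== PRECONDITION & SPEC =====
def Spec_get_nps_distribution_py (scores : List Int) (out : List (String × Int)) : Prop := out = get_nps_distribution_py_alt scores
instance (scores : List Int) (out : List (String × Int)) : Decidable (Spec_get_nps_distribution_py scores out) := by unfold Spec_get_nps_distribution_py; infer_instance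

-- ===== CLAIM (what is proved, stated in full; the proofs are below) =====
def Claim_equal_get_nps_distribution_py : Prop := ∀ (scores : List Int), Dom_get_nps_distribution_py scores → Spec_get_nps_distribution_py scores (get_nps_distribution_py scores)

-- ===== LEMMAS AND PROOFS =====

theorem npsScan_le_length (ss : List Int) (x : Int) :
    ∀ i, i ≤ ss.length → npsScan ss x i ≤ ss.length := by
  intro i
  induction hn : ss.length - i using Nat.strong_induction_on generalizing i with
  | _ k ih =>
    intro hi
    rw [npsScan]
    split
    · split
      · exact ih (ss.length - (i+1)) (by omega) (i+1) rfl (by omega)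
      · exact hi
    · exact hi

-- the scan never passes an element > x: everything before its result is ≤ x
theorem npsScan_le (ss : List Int) (x : Int) :
    ∀ i, (∀ a ∈ ss.take i, a ≤ x) → ∀ a ∈ ss.take (npsScan ss x i), a ≤ x := by
  intro i
  induction hn : ss.length - i using Nat.strong_induction_on generalizing i with
  | _ k ih =>
    intro hpre
    rw [npsScan]
    split
    · rename_i hlt
      split
      · rename_i hle
        refine ih (ss.length - (i+1)) (by omega) (i+1) rfl ?_
        intro a ha
        rw [List.take_succ] at ha
        rcases List.mem_append.mp ha with h | h
        · exact hpre a h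
        · rw [List.getElem?_eq_getElem hlt] at h
          simp only [Option.toList_some, List.mem_singleton] at h
          subst h; exact hle
      · exact hpre
    · exact hpre

-- On a sorted list, the scan from a position all of whose predecessors are ≤ x
-- stops exactly at the number of elements ≤ x.
theorem npsScan_countP (ss : List Int) (x : Int)
    (hsort : ss.Pairwise (· ≤ ·)) :
    ∀ i, i ≤ ss.length → (∀ a ∈ ss.take i, a ≤ x) →
      npsScan ss x i = ss.countP (fun s => decide (s ≤ x)) := by
  intro i
  induction hn : ss.length - i using Nat.strong_induction_on generalizing i with
  | _ k ih =>
    intro hi hpre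
    rw [npsScan]
    split
    · rename_i hlt
      split
      · rename_i hle
        refine ih (ss.length - (i+1)) (by omega) (i+1) rfl (by omega) ?_
        intro a ha
        rw [List.take_succ] at ha
        rcases List.mem_append.mp ha with h | h
        · exact hpre a h
        · rw [List.getElem?_eq_getElem hlt] at h
          simp only [Option.toList_some, List.mem_singleton] at h
          subst h; exact hle
      · rename_i hgt
        have hsplit : ss = ss.take i ++ ss.drop i := (List.take_append_drop i ss).symm
        have hdrop : (ss.drop i).Pairwise (· ≤ ·) := hsort.sublist (List.drop_sublist i ss)
        have hcons : ss.drop i = ss[i] :: ss.drop (i + 1) := List.drop_eq_getElem_cons hlt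
        rw [hcons, List.pairwise_cons] at hdrop
        have hafter : ∀ a ∈ ss.drop i, ¬ a ≤ x := by
          intro a ha hax
          rw [hcons, List.mem_cons] at ha
          rcases ha with rfl | ha
          · exact hgt hax
          · exact hgt (le_trans (hdrop.1 a ha) hax)
        have h1 : (ss.take i).countP (fun s => decide (s ≤ x)) = i := by
          have hlen' : (ss.take i).length = i := by rw [List.length_take]; omega
          exact (List.countP_eq_length.mpr (fun a ha => by simpa using hpre a ha)).trans hlen'
        have h2 : (ss.drop i).countP (fun s => decide (s ≤ x)) = 0 := by
          rw [List.countP_eq_zero]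
          intro a ha; simpa using hafter a ha
        calc i = (ss.take i).countP (fun s => decide (s ≤ x)) +
                  (ss.drop i).countP (fun s => decide (s ≤ x)) := by omega
          _ = ss.countP (fun s => decide (s ≤ x)) := by
                rw [← List.countP_append, ← hsplit]
    · rename_i hge
      have hieq : i = ss.length := by omega
      have : ss.countP (fun s => decide (s ≤ x)) = ss.length := by
        rw [List.countP_eq_length]
        intro a ha
        have : a ∈ ss.take i := by rw [hieq, List.take_length]; exact ha
        simpa using hpre a this
      omega

theorem countP_split6 (l : List Int) :
    l.countP (fun s => decide (s ≤ 8)) =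
      l.countP (fun s => decide (s ≤ 6)) + l.countP (fun s => decide (7 ≤ s ∧ s ≤ 8)) := by
  induction l with
  | nil => rfl
  | cons a t ih =>
    simp only [List.countP_cons, ih]
    by_cases h6 : a ≤ 6 <;> by_cases h7 : 7 ≤ a <;> by_cases h8 : a ≤ 8 <;>
      simp [h6, h7, h8] <;> omega

theorem countP_split8 (l : List Int) :
    l.length = l.countP (fun s => decide (s ≤ 8)) + l.countP (fun s => decide (s ≥ 9)) := by
  induction l with
  | nil => rfl
  | cons a t ih =>
    simp only [List.countP_cons, List.length_cons, ih]
    by_cases h8 : a ≤ 8 <;> by_cases h9 : a ≥ 9 <;>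
      simp [h8, h9] <;> omega

-- ===== VERDICT (by name: the statement is the Claim_ definition above) =====
theorem get_nps_distribution_py_spec : Claim_equal_get_nps_distribution_py := by
  intro scores _
  unfold Spec_get_nps_distribution_py get_nps_distribution_py get_nps_distribution_py_alt
  simp only
  set ss := PySem.List.sorted scores (fun s => s) false with hss
  have hperm : ss.Perm scores := PySem.List.sorted_perm scores (fun s => s) false
  have hsort : ss.Pairwise (· ≤ ·) := by
    have := PySem.List.sorted_pairwise (xs := scores) (key := fun s => s)
    simpa using this
  have hd : npsScan ss 6 0 = ss.countP (fun s => decide (s ≤ 6)) :=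
    npsScan_countP ss 6 hsort 0 (Nat.zero_le _) (by simp)
  have hdle : npsScan ss 6 0 ≤ ss.length := npsScan_le_length ss 6 0 (Nat.zero_le _)
  have hpre8 : ∀ a ∈ ss.take (npsScan ss 6 0), a ≤ 8 := by
    intro a ha
    have h6 := npsScan_le ss 6 0 (by simp) a ha
    omega
  have ht : npsScan ss 8 (npsScan ss 6 0) = ss.countP (fun s => decide (s ≤ 8)) :=
    npsScan_countP ss 8 hsort (npsScan ss 6 0) hdle hpre8
  rw [hd] at ht
  have hfilter : ∀ p : Int → Bool, (scores.filter p).length = ss.countP p := by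
    intro p
    rw [← List.countP_eq_length_filter, hperm.countP_eq]
  have hlen : ss.length = scores.length := hperm.length_eq
  have e6 := countP_split6 ss
  have e8 := countP_split8 ss
  simp only [ht, hd, hfilter, List.cons.injEq, Prod.mk.injEq,
    true_and, and_true]
  omega
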